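/- GENERATED by farm/mkstatement.py from design/units.tsv (unit `vorbis_decode_initial.3`) and the assertions of Vorbis/Spec/DecodeInitial.lean — do not edit.
   THE STATEMENT of the proof unit `vorbis_decode_initial.3`: segment 3 of `vorbis_decode_initial` (5 instructions; entries 0x1131eb;
   exits 0x1131b0,0x1131eb; ranges 0x1131eb-0x1131f8)
   takes each of its entry assertions to one of its exit assertions (`Vorbis.Spec.vorbis_decode_initial.Seg3`), given the contracts of its callees.
   What the names mean: Vorbis/Spec/Basic.lean (the shared hypotheses), Vorbis/Spec/DecodeInitial.lean (the assertions). The theorem to prove: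
   `theorem vorbis_decode_initial_3_ok : Vorbis.Spec.vorbis_decode_initial_3.Statement`. -/
import Vorbis.Spec.DecodeInitial
import Vorbis.Spec.Reader
namespace Vorbis.Spec.vorbis_decode_initial_3
open X86 X86.User Asan

/-- The statement of unit `vorbis_decode_initial.3`. -/
def Statement : Prop :=
  ∀ (Lay : Layout) (_hLay : Lay.hi = 0x1000000) (μ : Microarch) (_hμ : UserX.MicroOK μ) (u₀ : State)
    (_hcode : HasCodeNat Lay u₀ Vorbis.L.vorbis_decode_initial.entry Vorbis.Code.code_vorbis_decode_initial.nat Vorbis.L.vorbis_decode_initial.size)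
    (_h_get8_packet : ∀ (others : List Obj) (frames : List (Nat × FrameLayout)) (Blk : Block → Prop) (len : Nat), Calls Lay μ Vorbis.WayInv (Vorbis.conv u₀) Vorbis.L.get8_packet.entry (Vorbis.Spec.get8_packet.spec others frames Blk len)),
    Vorbis.Spec.vorbis_decode_initial.Seg3 Lay μ u₀

end Vorbis.Spec.vorbis_decode_initial_3
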